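-- pv_equiv track=rewrite | github.com/planT-444/terrible-twins-game-simulation | Terrible Twins Game Simulation.py | num_pairs
-- ===== SOURCE A (Python) =====
-- NUM_RANKS = 6
--
-- def num_pairs(drawn_cards: list[int]) -> int:
--     total_pairs = 0
--     rank_occurences = [0] * NUM_RANKS
--     for card in drawn_cards:
--         if rank_occurences[card] == 1:
--             total_pairs += 1
--         rank_occurences[card] = (rank_occurences[card] + 1) % 2
--     return total_pairs
-- ===== SOURCE B (Python) =====
-- NUM_RANKS = 6
--
-- def num_pairs(drawn_cards: list[int]) -> int:
--     counts = [0] * NUM_RANKS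
--     for card in drawn_cards:
--         counts[card] += 1
--     return sum(c // 2 for c in counts)
-- ===== Notes on version B (the rewrite author's own statement) =====
-- stated objective: simpler
-- what changed: A tracks running parity per rank and increments the pair total inline during the single loop; B first builds a full occurrence-count table and then sums floor-halves of the counts in a separate pass.
import Mathlib
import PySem

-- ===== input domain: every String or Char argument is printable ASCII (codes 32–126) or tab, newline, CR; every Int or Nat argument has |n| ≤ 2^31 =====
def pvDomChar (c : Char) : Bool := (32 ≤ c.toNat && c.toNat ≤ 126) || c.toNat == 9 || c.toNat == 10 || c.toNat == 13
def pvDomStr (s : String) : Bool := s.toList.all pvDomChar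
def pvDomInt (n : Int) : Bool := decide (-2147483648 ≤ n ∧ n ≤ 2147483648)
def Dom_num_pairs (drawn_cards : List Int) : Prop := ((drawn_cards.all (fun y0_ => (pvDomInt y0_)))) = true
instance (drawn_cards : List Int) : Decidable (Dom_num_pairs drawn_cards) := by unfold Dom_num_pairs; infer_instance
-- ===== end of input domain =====

-- B replaces A's inline parity-tracking loop with a plain occurrence-count pass followed by a
-- separate floor-halving sum; same O(n) cost, simpler decomposition.

-- ===== PORT A =====
def num_pairs (drawn_cards : List Int) : Int :=
  (drawn_cards.foldl
    (fun (st : Int × List Int) card =>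
      (if PySem.List.pyGetD st.2 card 0 == 1 then st.1 + 1 else st.1,
       PySem.List.pySetD st.2 card (PySem.Int.mod (PySem.List.pyGetD st.2 card 0 + 1) 2)))
    (0, List.replicate 6 0)).1

-- ===== PORT B =====
def num_pairs_alt (drawn_cards : List Int) : Int :=
  let counts := drawn_cards.foldl
    (fun cs card => PySem.List.pySetD cs card (PySem.List.pyGetD cs card 0 + 1))
    (List.replicate 6 0)
  counts.foldl (fun acc c => acc + PySem.Int.floordiv c 2) 0

-- ===== PRECONDITION & SPEC =====
-- Pre_ excludes exactly the inputs on which A raises IndexError: a card outside -6 ≤ card < 6.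
def Pre_num_pairs (drawn_cards : List Int) : Prop :=
  ∀ c ∈ drawn_cards, PySem.Raise.InRange 6 c
instance (drawn_cards : List Int) : Decidable (Pre_num_pairs drawn_cards) := by
  unfold Pre_num_pairs; infer_instance
def pvWitness_num_pairs : List Int := [0, 3, -1, 3, 5, 0]

def Spec_num_pairs (drawn_cards : List Int) (out : Int) : Prop := out = num_pairs_alt drawn_cards
instance (drawn_cards : List Int) (out : Int) : Decidable (Spec_num_pairs drawn_cards out) := by
  unfold Spec_num_pairs; infer_instance

-- ===== CLAIM (what is proved, stated in full; the proofs are below) =====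
def Claim_equal_num_pairs : Prop := ∀ (drawn_cards : List Int), Dom_num_pairs drawn_cards → Pre_num_pairs drawn_cards → Spec_num_pairs drawn_cards (num_pairs drawn_cards)

-- ===== LEMMAS AND PROOFS =====

-- the Nat index Python's negative-wrap indexing selects
def pvIdx (L : Nat) (i : Int) : Nat := if 0 ≤ i then i.toNat else L - (-i).toNat

-- Σ c//2 over a count table
def pvS (cnt : List Int) : Int := (cnt.map (fun c => PySem.Int.floordiv c 2)).sum

lemma pvIdx_lt (L : Nat) (i : Int) (h : PySem.Raise.InRange L i) : pvIdx L i < L := by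
  rcases h with ⟨h1, h2⟩
  unfold pvIdx; split_ifs with h0 <;> omega

lemma pvGetD_eq (xs : List Int) (i : Int) (d : Int) (h : PySem.Raise.InRange xs.length i) :
    PySem.List.pyGetD xs i d = xs.getD (pvIdx xs.length i) d := by
  rcases h with ⟨h1, h2⟩
  unfold pvIdx
  simp only [PySem.List.pyGetD, PySem.List.pyGet?, PySem.List.pyIdx?]
  split_ifs with h0 <;> simp_all [List.getD_eq_getElem?_getD]

lemma pvSetD_eq (xs : List Int) (i : Int) (v : Int) (h : PySem.Raise.InRange xs.length i) :
    PySem.List.pySetD xs i v = xs.set (pvIdx xs.length i) v := by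
  rcases h with ⟨h1, h2⟩
  unfold pvIdx
  simp only [PySem.List.pySetD, PySem.List.pySet?, PySem.List.pyIdx?]
  split_ifs with h0 <;> simp_all

lemma pvS_set (cnt : List Int) (n : Nat) (v : Int) (hn : n < cnt.length) :
    pvS (cnt.set n v) =
      pvS cnt - PySem.Int.floordiv (cnt.getD n 0) 2 + PySem.Int.floordiv v 2 := by
  induction cnt generalizing n with
  | nil => simp at hn
  | cons x xs ih =>
    cases n with
    | zero => simp [pvS]; ring
    | succ m =>
      have hm : m < xs.length := by simpa using hn
      have := ih m hm
      simp only [List.set, pvS, List.map, List.sum_cons, List.getD] at *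
      simp only [List.getElem?_cons_succ]
      omega

lemma pvFoldl_sum (cnt : List Int) (a : Int) :
    cnt.foldl (fun acc c => acc + PySem.Int.floordiv c 2) a = a + pvS cnt := by
  induction cnt generalizing a with
  | nil => simp [pvS]
  | cons x xs ih =>
    simp only [List.foldl_cons, pvS, List.map_cons, List.sum_cons] at *
    rw [ih]; ring

lemma pvHalf_succ (c : Int) :
    PySem.Int.floordiv (c + 1) 2 =
      PySem.Int.floordiv c 2 + (if PySem.Int.mod c 2 = 1 then 1 else 0) := by
  rw [PySem.Int.floordiv_eq_ediv_of_pos (by norm_num),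
      PySem.Int.floordiv_eq_ediv_of_pos (by norm_num),
      PySem.Int.mod_eq_emod_of_pos (by norm_num)]
  split_ifs with h <;> omega

lemma pvMod_step (c : Int) :
    PySem.Int.mod (PySem.Int.mod c 2 + 1) 2 = PySem.Int.mod (c + 1) 2 := by
  rw [PySem.Int.mod_eq_emod_of_pos (by norm_num),
      PySem.Int.mod_eq_emod_of_pos (by norm_num),
      PySem.Int.mod_eq_emod_of_pos (by norm_num)]
  omega

lemma pvMain (cards : List Int) (t : Int) (cnt : List Int)
    (h : ∀ c ∈ cards, PySem.Raise.InRange cnt.length c) :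
    cards.foldl
      (fun (st : Int × List Int) card =>
        (if PySem.List.pyGetD st.2 card 0 == 1 then st.1 + 1 else st.1,
         PySem.List.pySetD st.2 card (PySem.Int.mod (PySem.List.pyGetD st.2 card 0 + 1) 2)))
      (t, cnt.map (fun c => PySem.Int.mod c 2)) =
    (t + pvS (cards.foldl
        (fun cs card => PySem.List.pySetD cs card (PySem.List.pyGetD cs card 0 + 1)) cnt)
       - pvS cnt,
     (cards.foldl
        (fun cs card => PySem.List.pySetD cs card (PySem.List.pyGetD cs card 0 + 1)) cnt).map
       (fun c => PySem.Int.mod c 2)) := by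
  induction cards generalizing t cnt with
  | nil => simp
  | cons card rest ih =>
    have hc : PySem.Raise.InRange cnt.length card := h card (by simp)
    set n := pvIdx cnt.length card with hn
    have hnl : n < cnt.length := pvIdx_lt _ _ hc
    set c := cnt.getD n 0 with hcdef
    have hcm : PySem.Raise.InRange (cnt.map (fun c => PySem.Int.mod c 2)).length card := by
      simpa using hc
    have hget : PySem.List.pyGetD (cnt.map (fun c => PySem.Int.mod c 2)) card 0
        = PySem.Int.mod c 2 := by
      rw [pvGetD_eq _ _ _ hcm]
      simp only [List.length_map]
      rw [← hn, hcdef]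
      rcases List.getElem?_eq_some_iff.mpr ⟨hnl, rfl⟩ with _
      simp [List.getD_eq_getElem?_getD, hnl]
    have hset : PySem.List.pySetD (cnt.map (fun c => PySem.Int.mod c 2)) card
          (PySem.Int.mod (PySem.Int.mod c 2 + 1) 2)
        = (cnt.set n (c + 1)).map (fun c => PySem.Int.mod c 2) := by
      rw [pvSetD_eq _ _ _ hcm]
      simp only [List.length_map, ← hn, List.map_set]
      rw [pvMod_step]
    have hsetB : PySem.List.pySetD cnt card (PySem.List.pyGetD cnt card 0 + 1)
        = cnt.set n (c + 1) := by
      rw [pvSetD_eq _ _ _ hc, pvGetD_eq _ _ _ hc, ← hn, ← hcdef]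
    have hrest : ∀ x ∈ rest, PySem.Raise.InRange (cnt.set n (c + 1)).length x := by
      intro x hx; simpa using h x (by simp [hx])
    simp only [List.foldl_cons, hget, hset, hsetB]
    rw [ih _ _ hrest]
    have hps : pvS (cnt.set n (c + 1)) = pvS cnt - PySem.Int.floordiv c 2
        + PySem.Int.floordiv (c + 1) 2 := by
      rw [pvS_set _ _ _ hnl, ← hcdef]
    simp only [Prod.mk.injEq]
    refine ⟨?_, trivial⟩
    rw [hps, pvHalf_succ]
    split_ifs with h1 h2 h2 <;> simp_all <;> omega

lemma pvPre_len (drawn_cards : List Int) (h : Pre_num_pairs drawn_cards) :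
    ∀ c ∈ drawn_cards, PySem.Raise.InRange (List.replicate 6 (0:Int)).length c := by
  intro c hc; simpa using h c hc

-- ===== VERDICT (by name: the statement is the Claim_ definition above) =====
theorem num_pairs_spec : Claim_equal_num_pairs := by
  intro drawn_cards _ hpre
  unfold Spec_num_pairs num_pairs num_pairs_alt
  have hrep : (List.replicate 6 (0:Int)) =
      (List.replicate 6 (0:Int)).map (fun c => PySem.Int.mod c 2) := by decide
  conv_lhs => rw [hrep]
  rw [pvMain drawn_cards 0 (List.replicate 6 0) (pvPre_len _ hpre)]
  rw [pvFoldl_sum]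
  have h2 : pvS ([0,0,0,0,0,0] : List Int) = 0 := by decide
  simp [h2]
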